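-- pv_equiv track=rewrite | github.com/JeonheonKim/Python | algorithm_test/Month_2/Number_3.py | solution
-- ===== SOURCE A (Python) =====
-- def solution(arr):
--     div_n = max(arr)
--     for i in range(div_n,0,-1):
--         lst = [j % i for j in arr]
--         num = set(lst)
--         if (len(num) == 1) & (list(num)[0] == 0):
--             lst = [j // i for j in arr]
--             a = 1
--             for k in lst:
--                 a = a*k
--             answer = i*a
--             break
--     return answer
-- ===== SOURCE B (Python) =====
-- def solution(arr):
--     # gcd of all elements by a hand-written Euclid fold, then g * product of quotients
--     g = 0
--     for x in arr:
--         a, b = g, (x if x >= 0 else -x)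
--         while b:
--             a, b = b, a % b
--         g = a
--     p = 1
--     for x in arr:
--         p *= x // g
--     return g * p
-- ===== Notes on version B (the rewrite author's own statement) =====
-- stated objective: faster
-- what changed: A scans i downward from max(arr) testing for every i whether all remainders are zero (rebuilding a remainder list and a set per i); B computes the array gcd with a hand-written Euclid fold and returns gcd times the product of the quotients in one extra pass.
-- outside the precondition, e.g. on solution([]): A raises ValueError, B returns 0; on solution([-2, -4]): A raises UnboundLocalError, B returns 4
import Mathlib
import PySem

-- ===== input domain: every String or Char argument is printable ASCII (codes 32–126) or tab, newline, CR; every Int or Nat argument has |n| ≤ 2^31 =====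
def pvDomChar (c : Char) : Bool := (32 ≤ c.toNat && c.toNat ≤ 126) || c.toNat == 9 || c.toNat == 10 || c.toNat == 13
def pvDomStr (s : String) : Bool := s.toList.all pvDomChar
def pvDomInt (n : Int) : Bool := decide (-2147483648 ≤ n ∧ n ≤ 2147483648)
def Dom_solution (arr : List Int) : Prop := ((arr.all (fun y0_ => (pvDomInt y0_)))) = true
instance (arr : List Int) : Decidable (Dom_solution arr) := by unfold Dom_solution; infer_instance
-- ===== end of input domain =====

-- B replaces A's downward scan from max(arr) (testing every i whether it divides all elements)
-- by a single Euclid-fold computing the gcd, then multiplies the quotients; objective: faster.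

-- ===== PORT A =====
-- loop body of A's 'for i in range(div_n,0,-1)': returns some answer on the 'break' iteration, none otherwise
def aBody (arr : List Int) (i : Int) : Option Int :=
  let lst := arr.map (fun j => PySem.Int.mod j i)
  let num : PySem.Set Int := PySem.Set.ofList lst
  -- '(len(num) == 1) & (list(num)[0] == 0)': when len(num) == 1 the set's single element is its head;
  -- when len(num) ≠ 1 the conjunction is False whatever list(num)[0] is, so headD is order-safe
  if num.length = 1 ∧ num.headD 0 = 0 then
    some (i * ((arr.map (fun j => PySem.Int.floordiv j i)).foldl (fun a k => a * k) 1))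
  else none

def aStep (arr : List Int) (acc : Option Int) (i : Int) : Option Int :=
  match acc with
  | some _ => acc        -- after the 'break': later iterations do not run
  | none => aBody arr i

def solution (arr : List Int) : Int :=
  match PySem.List.max? arr (fun x => x) with
  | none => 0            -- max([]) raises ValueError: excluded by Pre_solution
  | some divN =>
    ((PySem.List.pyRange divN 0 (-1)).foldl (aStep arr) none).getD 0
    -- getD 0: 'answer' never assigned (UnboundLocalError) is excluded by Pre_solution

-- ===== PORT B =====
-- 'a, b = g, abs(x); while b: a, b = b, a % b'.  b is always ≥ 0 here (abs at entry,
-- PySem.Int.mod keeps it ≥ 0 for a positive divisor), so 'while b' is exactly '0 < b'.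
def euclidLoop (a b : Int) : Int :=
  if h : 0 < b then euclidLoop b (PySem.Int.mod a b) else a
termination_by b.toNat
decreasing_by
  have h2 := PySem.Int.mod_lt a h
  omega

def solution_alt (arr : List Int) : Int :=
  let g := arr.foldl (fun g x => euclidLoop g (if 0 ≤ x then x else -x)) 0
  let p := arr.foldl (fun p x => p * PySem.Int.floordiv x g) 1
  g * p

-- ===== PRECONDITION & SPEC =====
-- A raises on every input excluded here: ValueError on [], UnboundLocalError when max(arr) ≤ 0
-- (the loop body never runs, 'answer' stays unbound); Pre_ admits exactly the inputs where A returns.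
def Pre_solution (arr : List Int) : Prop := ∃ x ∈ arr, 0 < x
instance (arr : List Int) : Decidable (Pre_solution arr) := by unfold Pre_solution; infer_instance

def pvWitness_solution : List Int := [6, -4, 2]

def Spec_solution (arr : List Int) (out : Int) : Prop := out = solution_alt arr
instance (arr : List Int) (out : Int) : Decidable (Spec_solution arr out) := by unfold Spec_solution; infer_instance

-- ===== CLAIM (what is proved, stated in full; the proofs are below) =====
def Claim_equal_solution : Prop := ∀ (arr : List Int), Dom_solution arr → Pre_solution arr → Spec_solution arr (solution arr)

-- ===== LEMMAS AND PROOFS =====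

-- the gcd accumulator B maintains, on the Nat side
def gFold (arr : List Int) (n : Nat) : Nat := arr.foldl (fun n x => Nat.gcd n x.natAbs) n

theorem euclidLoop_eq_gcd : ∀ (a b : Int), 0 ≤ a → 0 ≤ b →
    euclidLoop a b = (Int.gcd a b : Int) := by
  intro a b
  induction a, b using euclidLoop.induct with
  | case1 a b h ih =>
    intro ha _
    rw [euclidLoop, dif_pos h]
    rw [ih h.le (PySem.Int.mod_nonneg a h)]
    congr 1
    rw [PySem.Int.mod_eq_emod_of_pos h]
    obtain ⟨a', rfl⟩ := Int.eq_ofNat_of_zero_le ha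
    obtain ⟨b', rfl⟩ := Int.eq_ofNat_of_zero_le h.le
    have hcast : ((a' : Int) % (b' : Int)) = ((a' % b' : Nat) : Int) := by
      omega
    rw [hcast]
    simp only [Int.gcd_natCast_natCast]
    rw [Nat.gcd_comm b' (a' % b'), ← Nat.gcd_rec, Nat.gcd_comm]
  | case2 a b h =>
    intro ha hb
    rw [euclidLoop, dif_neg h]
    have hb0 : b = 0 := le_antisymm (not_lt.mp h) hb
    subst hb0
    simp [Int.gcd, Int.natAbs_of_nonneg ha]

theorem gfold_eq (arr : List Int) (n : Nat) :
    arr.foldl (fun g x => euclidLoop g (if 0 ≤ x then x else -x)) (n : Int) = (gFold arr n : Int) := by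
  induction arr generalizing n with
  | nil => simp [gFold]
  | cons x t ih =>
    have habs : (if 0 ≤ x then x else -x) = (x.natAbs : Int) := by
      split_ifs <;> omega
    simp only [List.foldl_cons, habs]
    rw [euclidLoop_eq_gcd _ _ (by positivity) (by positivity)]
    rw [Int.gcd_natCast_natCast]
    rw [ih]
    rfl

theorem gFold_dvd_init (arr : List Int) (n : Nat) : gFold arr n ∣ n := by
  induction arr generalizing n with
  | nil => simp [gFold]
  | cons x t ih =>
    exact dvd_trans (ih (Nat.gcd n x.natAbs)) (Nat.gcd_dvd_left _ _)

theorem gFold_dvd_mem (arr : List Int) : ∀ (n : Nat), ∀ x ∈ arr, gFold arr n ∣ x.natAbs := by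
  induction arr with
  | nil => intro n x hx; cases hx
  | cons y t ih =>
    intro n x hx
    rcases List.mem_cons.mp hx with rfl | hx
    · exact dvd_trans (gFold_dvd_init t (Nat.gcd n x.natAbs)) (Nat.gcd_dvd_right _ _)
    · exact ih _ x hx

theorem dvd_gFold (arr : List Int) (n d : Nat) (hn : d ∣ n)
    (h : ∀ x ∈ arr, d ∣ x.natAbs) : d ∣ gFold arr n := by
  induction arr generalizing n with
  | nil => exact hn
  | cons y t ih =>
    exact ih _ (Nat.dvd_gcd hn (h y (List.mem_cons_self ..))) (fun x hx => h x (List.mem_cons_of_mem _ hx))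

theorem foldl_aStep_some (arr : List Int) (l : List Int) (v : Int) :
    l.foldl (aStep arr) (some v) = some v := by
  induction l with
  | nil => rfl
  | cons i t ih => simpa [aStep] using ih

theorem foldl_aStep_none (arr : List Int) (l : List Int)
    (h : ∀ i ∈ l, aBody arr i = none) :
    l.foldl (aStep arr) none = none := by
  induction l with
  | nil => rfl
  | cons i t ih =>
    simp only [List.foldl_cons, aStep, h i (List.mem_cons_self ..)]
    exact ih (fun j hj => h j (List.mem_cons_of_mem _ hj))

-- set(lst) when every element of lst is 0 and lst ≠ []
theorem ofList_all_zero (l : List Int) (hne : l ≠ []) (h : ∀ x ∈ l, x = (0 : Int)) :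
    PySem.Set.ofList l = [0] := by
  have aux : ∀ (t : List Int), (∀ x ∈ t, x = (0 : Int)) → t.foldl PySem.Set.add [(0 : Int)] = [0] := by
    intro t
    induction t with
    | nil => intro _; rfl
    | cons y s ih =>
      intro hy
      have : y = 0 := hy y (List.mem_cons_self ..)
      subst this
      simpa [PySem.Set.add, PySem.Set.contains] using ih (fun x hx => hy x (List.mem_cons_of_mem _ hx))
  cases l with
  | nil => exact absurd rfl hne
  | cons y s =>
    have hy : y = 0 := h y (List.mem_cons_self ..)
    subst hy
    rw [PySem.Set.ofList_eq_foldl]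
    simpa [PySem.Set.add] using aux s (fun x hx => h x (List.mem_cons_of_mem _ hx))

theorem aBody_eq_some (arr : List Int) (i : Int) (hne : arr ≠ [])
    (h : ∀ j ∈ arr, PySem.Int.mod j i = 0) :
    aBody arr i = some (i * ((arr.map (fun j => PySem.Int.floordiv j i)).foldl (fun a k => a * k) 1)) := by
  simp only [aBody]
  have hz : PySem.Set.ofList (arr.map (fun j => PySem.Int.mod j i)) = [0] := by
    apply ofList_all_zero
    · simpa using hne
    · intro x hx
      obtain ⟨j, hj, rfl⟩ := List.mem_map.mp hx
      exact h j hj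
  rw [hz]
  simp

theorem aBody_eq_none (arr : List Int) (i : Int)
    (h : ∃ j ∈ arr, PySem.Int.mod j i ≠ 0) : aBody arr i = none := by
  simp only [aBody]
  obtain ⟨j, hj, hjne⟩ := h
  rw [if_neg]
  rintro ⟨h1, h2⟩
  have hmem : PySem.Int.mod j i ∈ PySem.Set.ofList (arr.map (fun j => PySem.Int.mod j i)) := by
    rw [PySem.Set.mem_ofList]
    exact List.mem_map.mpr ⟨j, hj, rfl⟩
  obtain ⟨y, hy⟩ := List.length_eq_one_iff.mp h1
  rw [hy] at hmem h2
  simp at hmem h2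
  exact hjne (hmem.trans h2)

-- ===== VERDICT (by name: the statement is the Claim_ definition above) =====
theorem solution_spec : Claim_equal_solution := by
  intro arr _ hpre
  obtain ⟨x0, hx0, hx0pos⟩ := hpre
  have hne : arr ≠ [] := by rintro rfl; cases hx0
  -- max
  obtain ⟨M, hM⟩ : ∃ M, PySem.List.max? arr (fun x => x) = some M := by
    cases h : PySem.List.max? arr (fun x => x) with
    | none => exact absurd ((PySem.List.max?_eq_none_iff arr (fun x => x)).mp h) hne
    | some M => exact ⟨M, rfl⟩
  have hMmem : M ∈ arr := PySem.List.max?_mem hM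
  have hMmax : ∀ y ∈ arr, y ≤ M := PySem.List.max?_isMax hM
  have hMpos : 0 < M := lt_of_lt_of_le hx0pos (hMmax x0 hx0)
  -- the gcd
  set g : Nat := gFold arr 0 with hg
  have hgdvd : ∀ x ∈ arr, g ∣ x.natAbs := fun x hx => gFold_dvd_mem arr 0 x hx
  have hgpos : 0 < g := by
    rcases Nat.eq_zero_or_pos g with h0 | h
    · exfalso
      have := hgdvd x0 hx0
      rw [h0] at this
      have : x0.natAbs = 0 := Nat.eq_zero_of_zero_dvd this
      omega
    · exact h
  have hgM : (g : Int) ≤ M := by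
    have := Nat.le_of_dvd (by omega : 0 < M.natAbs) (hgdvd M hMmem)
    omega
  -- every j in arr is divisible by g
  have hgdvdInt : ∀ j ∈ arr, (g : Int) ∣ j := by
    intro j hj
    exact Int.dvd_natAbs.mp (Int.natCast_dvd_natCast.mpr (hgdvd j hj))
  -- B's value
  have hB : solution_alt arr = (g : Int) * arr.foldl (fun p x => p * PySem.Int.floordiv x (g : Int)) 1 := by
    have h0 : arr.foldl (fun g x => euclidLoop g (if 0 ≤ x then x else -x)) 0 = (g : Int) := by
      simpa using gfold_eq arr 0
    simp only [solution_alt, h0]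
  -- A's range split
  have hsplit : PySem.List.pyRange M 0 (-1) =
      (PySem.List.pyRange ((g : Int) + 1) (M + 1) 1).reverse ++ (g : Int) :: (PySem.List.pyRange 1 (g : Int) 1).reverse := by
    have e1 : PySem.List.pyRange M 0 (-1) = (PySem.List.pyRange (0 + 1) (M + 1) 1).reverse :=
      PySem.List.pyRange_neg_one_eq_reverse M 0
    have e2 : PySem.List.pyRange (0 + 1) (M + 1) 1 =
        PySem.List.pyRange 1 (g : Int) 1 ++ (g : Int) :: PySem.List.pyRange ((g : Int) + 1) (M + 1) 1 := by
      rw [show ((0 : Int) + 1 = 1) from rfl,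
        PySem.List.pyRange_one_append 1 (g : Int) (M + 1) (by exact_mod_cast hgpos) (by omega),
        PySem.List.pyRange_one_cons (by omega : (g : Int) < M + 1)]
    rw [e1, e2]
    simp
  -- the scanned-down part yields none
  have hnone : ((PySem.List.pyRange ((g : Int) + 1) (M + 1) 1).reverse.foldl (aStep arr) none) = none := by
    apply foldl_aStep_none
    intro i hi
    rw [List.mem_reverse, PySem.List.mem_pyRange_one] at hi
    apply aBody_eq_none
    by_contra hcon
    push Not at hcon
    have hdvd : ∀ j ∈ arr, (i : Int) ∣ j := by
      intro j hj
      exact (PySem.Int.mod_eq_zero_iff_dvd j i).mp (hcon j hj)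
    have : i.natAbs ∣ g := by
      apply dvd_gFold arr 0 i.natAbs (dvd_zero _)
      intro x hx
      exact Int.natAbs_dvd_natAbs.mpr (hdvd x hx)
    have : i.natAbs ≤ g := Nat.le_of_dvd hgpos this
    omega
  -- the hit at g
  have hg0 : ∀ j ∈ arr, PySem.Int.mod j (g : Int) = 0 := by
    intro j hj
    exact (PySem.Int.mod_eq_zero_iff_dvd j (g : Int)).mpr (hgdvdInt j hj)
  -- assemble A
  unfold Spec_solution solution
  rw [hM]
  show ((PySem.List.pyRange M 0 (-1)).foldl (aStep arr) none).getD 0 = _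
  rw [hsplit, List.foldl_append, hnone, List.foldl_cons]
  show ((PySem.List.pyRange 1 (g : Int) 1).reverse.foldl (aStep arr) (aStep arr none (g : Int))).getD 0 = _
  have : aStep arr none (g : Int) = aBody arr (g : Int) := rfl
  rw [this, aBody_eq_some arr (g : Int) hne hg0, foldl_aStep_some]
  rw [hB]
  simp only [Option.getD_some]
  congr 1
  rw [List.foldl_map]
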